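-- pv_equiv track=rewrite | github.com/AnasImloul/Translation_Engine_Python | syllables.py | split_syllable
-- ===== SOURCE A (Python) =====
-- vowels = {
--     "a" : {"e":1,"i":1},
--     "e" : {"a":1,"i":2,"":1},
--     "i" : {"e":1,"a":1},
--     "o" : {"u":1},
--     "u":{"o":1, "a":2}
-- }
--
-- def split_syllable(syllable):
--
--     pre,vowel,post = "","",""
--
--     i = 0
--
--     n = len(syllable)
--
--     while i<n and syllable[i] not in vowels:
--         pre += syllable[i]
--         i+=1
--     while i<n and syllable[i] in vowels:
--         vowel += syllable[i]
--         i+=1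
--
--     post = syllable[i:]
--
--     return pre,vowel,post
-- ===== SOURCE B (Python) =====
-- import re
--
-- _SYLLABLE_RE = re.compile(r'([^aeiou]*)([aeiou]*)([\s\S]*)', re.DOTALL)
--
-- def split_syllable(syllable):
--     m = _SYLLABLE_RE.match(syllable)
--     return m.group(1), m.group(2), m.group(3)
-- ===== Notes on version B (the rewrite author's own statement) =====
-- stated objective: idiomatic
-- what changed: Replaces the two index-driven while-loops with character concatenation by a single regular-expression match whose three groups are the maximal non-vowel prefix, the maximal vowel run, and the remainder.
import Mathlib
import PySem

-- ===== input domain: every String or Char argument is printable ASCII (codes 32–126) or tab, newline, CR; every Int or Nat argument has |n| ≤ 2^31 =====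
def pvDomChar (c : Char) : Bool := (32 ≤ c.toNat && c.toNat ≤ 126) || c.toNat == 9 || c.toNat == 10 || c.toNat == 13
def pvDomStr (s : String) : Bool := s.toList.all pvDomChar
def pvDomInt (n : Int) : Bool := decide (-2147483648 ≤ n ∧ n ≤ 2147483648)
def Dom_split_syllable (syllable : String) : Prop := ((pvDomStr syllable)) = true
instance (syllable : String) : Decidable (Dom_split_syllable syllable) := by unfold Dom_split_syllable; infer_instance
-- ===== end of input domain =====

-- B replaces A's two index-driven while-loops by a single regex match (idiomatic); return values proved equal.

-- ===== PORT A =====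
-- keys of the module-level `vowels` dict (membership in a dict tests its keys)
def pvVowels : List Char := ['a', 'e', 'i', 'o', 'u']

-- `while i<n and syllable[i] not in vowels: pre += syllable[i]; i += 1`
def aLoop1 (s : List Char) (i : Nat) (pre : List Char) : List Char × Nat :=
  if h : i < s.length then
    if s[i] ∈ pvVowels then (pre, i)
    else aLoop1 s (i + 1) (pre ++ [s[i]])
  else (pre, i)
termination_by s.length - i

-- `while i<n and syllable[i] in vowels: vowel += syllable[i]; i += 1`
def aLoop2 (s : List Char) (i : Nat) (vowel : List Char) : List Char × Nat :=
  if h : i < s.length then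
    if s[i] ∈ pvVowels then aLoop2 s (i + 1) (vowel ++ [s[i]])
    else (vowel, i)
  else (vowel, i)
termination_by s.length - i

def split_syllable (syllable : String) : String × String × String :=
  let s := syllable.toList
  let r1 := aLoop1 s 0 []
  let r2 := aLoop2 s r1.2 []
  -- `post = syllable[i:]` : i is in [0, n], so the slice is `drop i`
  (String.ofList r1.1, String.ofList r2.1, String.ofList (s.drop r2.2))

-- ===== PORT B =====
-- Source B: re.match(r'([^aeiou]*)([aeiou]*)([\s\S]*)').  The regex groups are the maximal
-- run of non-vowels, then the maximal run of vowels, then everything else; this is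
-- exactly takeWhile/dropWhile twice (exact on all inputs: the groups are greedy and
-- [\s\S] matches every character).
def isVowelB (c : Char) : Bool := c = 'a' || c = 'e' || c = 'i' || c = 'o' || c = 'u'

def split_syllable_alt (syllable : String) : String × String × String :=
  let s := syllable.toList
  let g1 := s.takeWhile (fun c => !isVowelB c)
  let rest := s.dropWhile (fun c => !isVowelB c)
  let g2 := rest.takeWhile isVowelB
  let g3 := rest.dropWhile isVowelB
  (String.ofList g1, String.ofList g2, String.ofList g3)

-- ===== PRECONDITION & SPEC =====
def Spec_split_syllable (syllable : String) (out : String × String × String) : Prop := out = split_syllable_alt syllable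
instance (syllable : String) (out : String × String × String) : Decidable (Spec_split_syllable syllable out) := by unfold Spec_split_syllable; infer_instance

-- ===== CLAIM (what is proved, stated in full; the proofs are below) =====
def Claim_equal_split_syllable : Prop := ∀ (syllable : String), Dom_split_syllable syllable → Spec_split_syllable syllable (split_syllable syllable)

-- ===== LEMMAS AND PROOFS =====

theorem mem_pvVowels_iff (c : Char) : (c ∈ pvVowels) ↔ isVowelB c = true := by
  simp [pvVowels, isVowelB, or_assoc]

theorem aLoop1_eq (s : List Char) (i : Nat) (pre : List Char) :
    aLoop1 s i pre =
      (pre ++ (s.drop i).takeWhile (fun c => !isVowelB c),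
       i + ((s.drop i).takeWhile (fun c => !isVowelB c)).length) := by
  induction i, pre using aLoop1.induct (s := s) with
  | case1 i pre h hv =>
    rw [aLoop1]
    simp only [dif_pos h, if_pos hv]
    rw [List.drop_eq_getElem_cons h, List.takeWhile_cons]
    simp [(mem_pvVowels_iff _).mp hv]
  | case2 i pre h hv ih =>
    rw [aLoop1]
    simp only [dif_pos h, if_neg hv]
    rw [ih, List.drop_eq_getElem_cons h, List.takeWhile_cons]
    have : isVowelB s[i] = false := by
      rcases Bool.eq_false_or_eq_true (isVowelB s[i]) with h' | h'
      · exact absurd ((mem_pvVowels_iff _).mpr h') hv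
      · exact h'
    simp [this]
    omega
  | case3 i pre h =>
    rw [aLoop1]
    have : s.drop i = [] := List.drop_eq_nil_of_le (by omega)
    simp [dif_neg h, this]

theorem aLoop2_eq (s : List Char) (i : Nat) (vw : List Char) :
    aLoop2 s i vw =
      (vw ++ (s.drop i).takeWhile isVowelB,
       i + ((s.drop i).takeWhile isVowelB).length) := by
  induction i, vw using aLoop2.induct (s := s) with
  | case1 i vw h hv ih =>
    rw [aLoop2]
    simp only [dif_pos h, if_pos hv]
    rw [ih, List.drop_eq_getElem_cons h, List.takeWhile_cons]
    simp [(mem_pvVowels_iff _).mp hv]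
    omega
  | case2 i vw h hv =>
    rw [aLoop2]
    simp only [dif_pos h, if_neg hv]
    rw [List.drop_eq_getElem_cons h, List.takeWhile_cons]
    have : isVowelB s[i] = false := by
      rcases Bool.eq_false_or_eq_true (isVowelB s[i]) with h' | h'
      · exact absurd ((mem_pvVowels_iff _).mpr h') hv
      · exact h'
    simp [this]
  | case3 i vw h =>
    rw [aLoop2]
    have : s.drop i = [] := List.drop_eq_nil_of_le (by omega)
    simp [dif_neg h, this]

theorem drop_len_takeWhile (p : Char → Bool) (l : List Char) :
    l.drop (l.takeWhile p).length = l.dropWhile p := by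
  have h := List.takeWhile_append_dropWhile (p := p) (l := l)
  calc l.drop (l.takeWhile p).length
      = (l.takeWhile p ++ l.dropWhile p).drop (l.takeWhile p).length := by rw [h]
    _ = l.dropWhile p := List.drop_left

-- ===== VERDICT (by name: the statement is the Claim_ definition above) =====
theorem split_syllable_spec : Claim_equal_split_syllable := by
  intro syllable _
  unfold Spec_split_syllable split_syllable split_syllable_alt
  set s := syllable.toList with hs
  simp only [aLoop1_eq, aLoop2_eq, List.drop_zero, List.nil_append, Nat.zero_add]
  rw [drop_len_takeWhile]
  rw [← List.drop_drop, drop_len_takeWhile, drop_len_takeWhile]
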